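-- pv_equiv track=rewrite | github.com/hecanjog/buchla-score | seq.py | toFrames
-- ===== SOURCE A (Python) =====
-- def toFrames(seq, beat):
--     notelength = 0
--     notes = []
--     lastnote = 'x'
--
--     for i, b in enumerate(seq):
--         if b == 'X' and lastnote == 'x' and notelength > 0:
--             notes += [ notelength ]
--             notelength = beat
--         else:
--             notelength += beat
--
--         if i == len(seq) - 1:
--             notes += [ notelength ]
--
--         lastnote = b
--
--     return notes
-- ===== SOURCE B (Python) =====
-- def toFrames(seq, beat):
--     if not seq:
--         return []
--     bounds = [0]
--     for i, (prev, cur) in enumerate(zip(seq, seq[1:])):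
--         if cur == 'X' and prev == 'x':
--             bounds.append(i + 1)
--     bounds.append(len(seq))
--     return [(b - a) * beat for a, b in zip(bounds, bounds[1:])]
-- ===== Notes on version B (the rewrite author's own statement) =====
-- stated objective: alternative
-- what changed: Replaces A's single stateful pass (running note length, lastnote flag, end-of-list check inside the loop) by a two-phase boundary decomposition: first collect the rest-to-attack boundary indices, then emit (next_bound - bound) * beat for each consecutive pair of boundaries.
-- outside the precondition, e.g. on toFrames(['x', 'X'], 0): A returns [0], B returns [0, 0]; on toFrames(['x', 'X'], -1): A returns [-2], B returns [-1, -1]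
import Mathlib
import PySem

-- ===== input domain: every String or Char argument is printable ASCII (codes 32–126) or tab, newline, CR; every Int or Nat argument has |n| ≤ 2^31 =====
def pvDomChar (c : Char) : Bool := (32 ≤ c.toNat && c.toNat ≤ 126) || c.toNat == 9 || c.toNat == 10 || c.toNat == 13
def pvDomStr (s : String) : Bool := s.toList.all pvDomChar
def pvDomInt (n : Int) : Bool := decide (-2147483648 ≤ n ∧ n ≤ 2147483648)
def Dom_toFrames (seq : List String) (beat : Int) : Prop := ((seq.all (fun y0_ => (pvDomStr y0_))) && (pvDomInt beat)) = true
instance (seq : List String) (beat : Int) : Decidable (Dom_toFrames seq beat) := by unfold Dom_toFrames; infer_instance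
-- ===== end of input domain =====

-- B restructures A's single stateful pass into a two-phase boundary decomposition
-- (collect rest-to-attack boundary indices, then multiply index gaps by beat); alternative, same cost.

-- ===== PORT A =====
-- A's for-loop as structural recursion over the same state (notelength, notes, lastnote);
-- Python's `i == len(seq) - 1` is exactly `rest = []`.
def toFramesGo (beat : Int) : List String → Int → List Int → String → List Int
  | [], _, notes, _ => notes
  | b :: rest, notelength, notes, lastnote =>
    let st :=
      if b = "X" ∧ lastnote = "x" ∧ notelength > 0
      then (beat, notes ++ [notelength])
      else (notelength + beat, notes)
    let notes' := if rest = [] then st.2 ++ [st.1] else st.2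
    toFramesGo beat rest st.1 notes' b

def toFrames (seq : List String) (beat : Int) : List Int :=
  toFramesGo beat seq 0 [] "x"

-- ===== PORT B =====
-- zip(seq, seq[1:]) is seq.zip seq.tail; enumerate via PySem.List.enumerate.
def toFrames_alt (seq : List String) (beat : Int) : List Int :=
  if seq = [] then []
  else
    let bounds : List Int :=
      (PySem.List.enumerate (seq.zip seq.tail)).foldl
        (fun acc p => if p.2.2 = "X" ∧ p.2.1 = "x" then acc ++ [p.1 + 1] else acc) [0]
    let bounds := bounds ++ [(seq.length : Int)]
    (bounds.zip bounds.tail).map (fun p => (p.2 - p.1) * beat)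

-- ===== PRECONDITION & SPEC =====
-- Pre_ excludes only nonpositive beat combined with a rest-to-attack boundary: a beat is a
-- positive frame duration, so this corner is outside the natural domain, and there A (whose
-- `notelength > 0` positivity guard can never fire) returns one merged frame while B still
-- splits at the boundaries; neither value is specified for a nonpositive beat.
def Pre_toFrames (seq : List String) (beat : Int) : Prop :=
  1 ≤ beat ∨ ∀ p ∈ seq.zip seq.tail, ¬ (p.2 = "X" ∧ p.1 = "x")
instance (seq : List String) (beat : Int) : Decidable (Pre_toFrames seq beat) := by unfold Pre_toFrames; infer_instance
def pvWitness_toFrames : List String × Int := (["x", "X", "x"], 2)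

def Spec_toFrames (seq : List String) (beat : Int) (out : List Int) : Prop := out = toFrames_alt seq beat
instance (seq : List String) (beat : Int) (out : List Int) : Decidable (Spec_toFrames seq beat out) := by unfold Spec_toFrames; infer_instance

-- ===== CLAIM (what is proved, stated in full; the proofs are below) =====
def Claim_equal_toFrames : Prop := ∀ (seq : List String) (beat : Int), Dom_toFrames seq beat → Pre_toFrames seq beat → Spec_toFrames seq beat (toFrames seq beat)

-- ===== LEMMAS AND PROOFS =====

-- One unfolding step of A's loop (definitional).
theorem toFramesGo_cons (beat nl : Int) (b last : String) (rest : List String) (notes : List Int) :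
    toFramesGo beat (b :: rest) nl notes last
      = (fun st => toFramesGo beat rest st.1 (if rest = [] then st.2 ++ [st.1] else st.2) b)
          (if b = "X" ∧ last = "x" ∧ nl > 0 then (beat, notes ++ [nl]) else (nl + beat, notes)) := rfl

-- Segment lengths of the tail of the sequence: a new segment starts at each
-- rest-to-attack ('x' then 'X') boundary; k is the running length of the open segment.
def segLens : List String → String → Int → List Int
  | [], _, k => [k]
  | c :: t, last, k =>
    if c = "X" ∧ last = "x" then k :: segLens t c 1 else segLens t c (k + 1)

-- A computes beat-multiples of the segment lengths.
theorem toFramesGo_eq_segLens (beat : Int) (hb : 1 ≤ beat) :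
    ∀ (rest : List String) (c last : String) (k : Int), 1 ≤ k → ∀ (notes : List Int),
      toFramesGo beat (c :: rest) (k * beat) notes last
        = notes ++ (segLens (c :: rest) last k).map (· * beat) := by
  intro rest
  induction rest with
  | nil =>
    intro c last k hk notes
    have hpos : 0 < k * beat := mul_pos (by omega) (by omega)
    rw [toFramesGo_cons]
    by_cases h : c = "X" ∧ last = "x"
    · have hc : c = "X" ∧ last = "x" ∧ k * beat > 0 := ⟨h.1, h.2, hpos⟩
      rw [if_pos hc]
      simp [toFramesGo, segLens, h, one_mul]
    · have hc : ¬ (c = "X" ∧ last = "x" ∧ k * beat > 0) := by tauto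
      rw [if_neg hc]
      simp [toFramesGo, segLens, h, add_one_mul]
  | cons d t ih =>
    intro c last k hk notes
    have hpos : 0 < k * beat := mul_pos (by omega) (by omega)
    rw [toFramesGo_cons]
    by_cases h : c = "X" ∧ last = "x"
    · have hc : c = "X" ∧ last = "x" ∧ k * beat > 0 := ⟨h.1, h.2, hpos⟩
      rw [if_pos hc]
      have step := ih d c 1 le_rfl (notes ++ [k * beat])
      rw [one_mul] at step
      simp only [List.cons_ne_nil, if_false]
      rw [step]
      simp [segLens, h]
    · have hc : ¬ (c = "X" ∧ last = "x" ∧ k * beat > 0) := by tauto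
      rw [if_neg hc]
      have step := ih d c (k + 1) (by omega) notes
      rw [add_one_mul] at step
      simp only [List.cons_ne_nil, if_false]
      rw [step]
      simp [segLens, h]

-- The boundary positions B's first pass appends, as a plain recursion.
def posList : List (Int × String × String) → List Int
  | [] => []
  | (i, pr, c) :: t => if c = "X" ∧ pr = "x" then (i + 1) :: posList t else posList t

theorem foldl_posList (l : List (Int × String × String)) :
    ∀ (acc : List Int),
      l.foldl (fun acc p => if p.2.2 = "X" ∧ p.2.1 = "x" then acc ++ [p.1 + 1] else acc) acc
        = acc ++ posList l := by
  induction l with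
  | nil => simp [posList]
  | cons h t ih =>
    intro acc
    obtain ⟨i, pr, c⟩ := h
    by_cases hc : c = "X" ∧ pr = "x" <;> simp [posList, hc, ih]

-- Consecutive differences times beat, as a plain recursion.
def diffs (beat : Int) : Int → List Int → List Int
  | _, [] => []
  | prev, b :: t => (b - prev) * beat :: diffs beat b t

theorem zip_map_diffs (beat : Int) :
    ∀ (t : List Int) (prev : Int),
      ((prev :: t).zip t).map (fun p => (p.2 - p.1) * beat) = diffs beat prev t := by
  intro t
  induction t with
  | nil => intro prev; simp [diffs]
  | cons b t ih =>
    intro prev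
    rw [List.zip_cons_cons, List.map_cons, ih b]
    simp [diffs]

-- B's gap list equals the segment lengths times beat.
theorem diffs_posList_eq_segLens (beat : Int) :
    ∀ (rest : List String) (last : String) (p prevB : Int),
      diffs beat prevB
          (posList (PySem.List.enumerate ((last :: rest).zip rest) p)
            ++ [p + (rest.length : Int) + 1])
        = (segLens rest last (p + 1 - prevB)).map (· * beat) := by
  intro rest
  induction rest with
  | nil =>
    intro last p prevB
    simp [posList, diffs, segLens]
  | cons c t ih =>
    intro last p prevB
    have henum : PySem.List.enumerate ((last :: c :: t).zip (c :: t)) p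
        = (p, last, c) :: PySem.List.enumerate ((c :: t).zip t) (p + 1) := by
      rw [List.zip_cons_cons, PySem.List.enumerate_cons]
    rw [henum]
    have harith : p + ((c :: t).length : Int) + 1 = (p + 1) + (t.length : Int) + 1 := by
      push_cast [List.length_cons]; ring
    by_cases hc : c = "X" ∧ last = "x"
    · have ht := ih c (p + 1) (p + 1)
      have hk : (p + 1) + 1 - (p + 1) = (1 : Int) := by ring
      rw [hk] at ht
      simp only [posList, if_pos hc, List.cons_append, diffs]
      rw [harith, ht]
      simp [segLens, hc]
    · have ht := ih c (p + 1) prevB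
      have hk : (p + 1) + 1 - prevB = (p + 1 - prevB) + 1 := by ring
      rw [hk] at ht
      simp only [posList, if_neg hc]
      rw [harith, ht]
      simp [segLens, hc]

-- With no rest-to-attack boundary, A's loop just keeps adding beat and emits one frame.
theorem toFramesGo_noBoundary (beat : Int) :
    ∀ (rest : List String) (c last : String) (nl : Int) (notes : List Int),
      (∀ p ∈ (c :: rest).zip rest, ¬ (p.2 = "X" ∧ p.1 = "x")) →
      (c = "X" ∧ last = "x" → nl ≤ 0) →
      toFramesGo beat (c :: rest) nl notes last
        = notes ++ [nl + ((rest.length : Int) + 1) * beat] := by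
  intro rest
  induction rest with
  | nil =>
    intro c last nl notes _ hguard
    have hc : ¬ (c = "X" ∧ last = "x" ∧ nl > 0) := by
      rintro ⟨h1, h2, h3⟩; have := hguard ⟨h1, h2⟩; omega
    rw [toFramesGo_cons, if_neg hc]
    simp [toFramesGo]
  | cons d t ih =>
    intro c last nl notes hnb hguard
    have hc : ¬ (c = "X" ∧ last = "x" ∧ nl > 0) := by
      rintro ⟨h1, h2, h3⟩; have := hguard ⟨h1, h2⟩; omega
    rw [toFramesGo_cons, if_neg hc]
    simp only [List.cons_ne_nil, if_false]
    have hhead : ¬ (d = "X" ∧ c = "x") := by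
      have := hnb (c, d) (by rw [List.zip_cons_cons]; exact List.mem_cons_self)
      simpa using this
    have htail : ∀ p ∈ (d :: t).zip t, ¬ (p.2 = "X" ∧ p.1 = "x") := by
      intro p hp
      exact hnb p (by rw [List.zip_cons_cons]; exact List.mem_cons_of_mem _ hp)
    rw [ih d c (nl + beat) notes htail (fun h => absurd ⟨h.1, h.2⟩ hhead)]
    have : nl + beat + ((t.length : Int) + 1) * beat
        = nl + (((d :: t).length : Int) + 1) * beat := by
      push_cast [List.length_cons]; ring
    rw [this]

-- With no rest-to-attack boundary, B's first pass collects no positions.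
theorem posList_noBoundary :
    ∀ (l : List (String × String)) (p : Int),
      (∀ q ∈ l, ¬ (q.2 = "X" ∧ q.1 = "x")) →
      posList (PySem.List.enumerate l p) = [] := by
  intro l
  induction l with
  | nil => intro p _; simp [posList]
  | cons q t ih =>
    intro p hnb
    obtain ⟨pr, c⟩ := q
    rw [PySem.List.enumerate_cons]
    have hq : ¬ (c = "X" ∧ pr = "x") := by
      have := hnb (pr, c) List.mem_cons_self
      simpa using this
    simp only [posList, if_neg hq]
    exact ih (p + 1) (fun q hq2 => hnb q (List.mem_cons_of_mem _ hq2))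

-- ===== VERDICT (by name: the statement is the Claim_ definition above) =====
theorem toFrames_spec : Claim_equal_toFrames := by
  intro seq beat _ hpre
  unfold Spec_toFrames
  match seq with
  | [] => simp [toFrames, toFramesGo, toFrames_alt]
  | b :: rest =>
    rcases hpre with hpre | hnb
    case inr =>
      -- no boundary: both sides produce the single merged frame [len * beat]
      simp only [List.tail_cons] at hnb
      have hA : toFrames (b :: rest) beat = [0 + ((rest.length : Int) + 1) * beat] := by
        unfold toFrames
        exact toFramesGo_noBoundary beat rest b "x" 0 [] hnb (by omega)
      have hB : toFrames_alt (b :: rest) beat = [(((b :: rest).length : Int) - 0) * beat] := by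
        have h1 := foldl_posList (PySem.List.enumerate ((b :: rest).zip rest) 0) ([0] : List Int)
        rw [posList_noBoundary ((b :: rest).zip rest) 0 hnb] at h1
        simp only [toFrames_alt, List.cons_ne_nil, if_false, List.tail_cons]
        rw [h1]
        simp
      rw [hA, hB]
      push_cast [List.length_cons]
      ring_nf
    case inl =>
      -- A side: first iteration's guard is false (notelength = 0), then the invariant lemma.
      have hA : toFrames (b :: rest) beat = (segLens rest b 1).map (· * beat) := by
        have hc : ¬ (b = "X" ∧ "x" = "x" ∧ (0 : Int) > 0) := by simp
        unfold toFrames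
        rw [toFramesGo_cons, if_neg hc]
        match rest with
        | [] => simp [toFramesGo, segLens]
        | d :: t =>
          have step := toFramesGo_eq_segLens beat hpre t d b 1 le_rfl []
          rw [one_mul] at step
          simp only [List.cons_ne_nil, if_false, zero_add]
          rw [step]
          simp
      -- B side: reduce the fold/zip/map pipeline to diffs of posList, then the gap lemma.
      have hB : toFrames_alt (b :: rest) beat = (segLens rest b 1).map (· * beat) := by
        have h1 := foldl_posList (PySem.List.enumerate ((b :: rest).zip rest) 0) ([0] : List Int)
        simp only [List.singleton_append] at h1
        simp only [toFrames_alt, List.cons_ne_nil, if_false, List.tail_cons]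
        rw [h1]
        simp only [List.cons_append, List.tail_cons]
        rw [zip_map_diffs beat]
        have hlen : ((b :: rest).length : Int) = 0 + (rest.length : Int) + 1 := by
          push_cast [List.length_cons]; ring
        rw [hlen, diffs_posList_eq_segLens beat rest b 0 0]
        norm_num
      rw [hA, hB]
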